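-- pv_equiv track=rewrite | github.com/ScottSyms/itsgassesment | src/mcp_servers/evidence_assessor/tools.py | classify_evidence_type
-- ===== SOURCE A (Python) =====
-- from enum import Enum
--
-- class EvidenceType(str, Enum):
--     """Types of evidence documents."""
--
--     POLICY = "Policy"
--     PROCEDURE = "Procedure"
--     STANDARD = "Standard"
--     GUIDELINE = "Guideline"
--     DIAGRAM = "Diagram"
--     CONFIGURATION = "Configuration"
--     SCREENSHOT = "Screenshot"
--     LOG = "Log"
--     REPORT = "Report"
--     ATTESTATION = "Attestation"
--     CONTRACT = "Contract"
--     TRAINING = "Training Record"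
--     OTHER = "Other"
--
-- def classify_evidence_type(filename: str, content: str) -> EvidenceType:
--     """
--     Classify evidence type based on filename and content.
--
--     Args:
--         filename: Name of the file
--         content: Content of the file
--
--     Returns:
--         Classified evidence type
--     """
--     filename_lower = filename.lower()
--     content_lower = content.lower()[:1000]  # Check first 1000 chars
--
--     # Check filename patterns
--     if any(word in filename_lower for word in ["policy", "pol-"]):
--         return EvidenceType.POLICY
--     if any(word in filename_lower for word in ["procedure", "proc-", "sop"]):
--         return EvidenceType.PROCEDURE
--     if any(word in filename_lower for word in ["standard", "std-"]):
--         return EvidenceType.STANDARD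
--     if any(word in filename_lower for word in ["diagram", "architecture", "network"]):
--         return EvidenceType.DIAGRAM
--     if any(word in filename_lower for word in ["config", "settings"]):
--         return EvidenceType.CONFIGURATION
--     if any(word in filename_lower for word in [".png", ".jpg", ".jpeg", "screenshot"]):
--         return EvidenceType.SCREENSHOT
--     if any(word in filename_lower for word in ["log", "audit"]):
--         return EvidenceType.LOG
--     if any(word in filename_lower for word in ["report", "assessment"]):
--         return EvidenceType.REPORT
--     if any(word in filename_lower for word in ["training", "awareness"]):
--         return EvidenceType.TRAINING
--     if any(word in filename_lower for word in ["contract", "agreement", "sla"]):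
--         return EvidenceType.CONTRACT
--
--     # Check content patterns
--     if "policy" in content_lower and "shall" in content_lower:
--         return EvidenceType.POLICY
--     if "procedure" in content_lower and "step" in content_lower:
--         return EvidenceType.PROCEDURE
--
--     return EvidenceType.OTHER
-- ===== SOURCE B (Python) =====
-- from enum import Enum
--
--
-- class EvidenceType(str, Enum):
--     """Types of evidence documents."""
--
--     POLICY = "Policy"
--     PROCEDURE = "Procedure"
--     STANDARD = "Standard"
--     GUIDELINE = "Guideline"
--     DIAGRAM = "Diagram"
--     CONFIGURATION = "Configuration"
--     SCREENSHOT = "Screenshot"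
--     LOG = "Log"
--     REPORT = "Report"
--     ATTESTATION = "Attestation"
--     CONTRACT = "Contract"
--     TRAINING = "Training Record"
--     OTHER = "Other"
--
--
-- # Each filename keyword carries the priority of the rule it belongs to.
-- _KEYWORD_PRIORITY = [
--     ("policy", 0), ("pol-", 0),
--     ("procedure", 1), ("proc-", 1), ("sop", 1),
--     ("standard", 2), ("std-", 2),
--     ("diagram", 3), ("architecture", 3), ("network", 3),
--     ("config", 4), ("settings", 4),
--     (".png", 5), (".jpg", 5), (".jpeg", 5), ("screenshot", 5),
--     ("log", 6), ("audit", 6),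
--     ("report", 7), ("assessment", 7),
--     ("training", 8), ("awareness", 8),
--     ("contract", 9), ("agreement", 9),
--     ("sla", 9),
-- ]
--
-- _TYPES = [
--     EvidenceType.POLICY,
--     EvidenceType.PROCEDURE,
--     EvidenceType.STANDARD,
--     EvidenceType.DIAGRAM,
--     EvidenceType.CONFIGURATION,
--     EvidenceType.SCREENSHOT,
--     EvidenceType.LOG,
--     EvidenceType.REPORT,
--     EvidenceType.TRAINING,
--     EvidenceType.CONTRACT,
-- ]
--
--
-- def classify_evidence_type(filename: str, content: str) -> EvidenceType:
--     fl = filename.lower()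
--     cl = content.lower()[:1000]
--     # Collect the priorities of ALL matching filename keywords, then take the
--     # best (smallest) one: no ordered rule chain, precedence is the argmin.
--     hits = [prio for kw, prio in _KEYWORD_PRIORITY if kw in fl]
--     if hits:
--         return _TYPES[min(hits)]
--     if "policy" in cl and "shall" in cl:
--         return EvidenceType.POLICY
--     if "procedure" in cl and "step" in cl:
--         return EvidenceType.PROCEDURE
--     return EvidenceType.OTHER
-- ===== Notes on version B (the rewrite author's own statement) =====
-- stated objective: alternative
-- what changed: Replaces A's ordered ten-branch first-match if-chain by a collect-then-argmin pass: every matching filename keyword contributes its rule priority and the smallest priority selects the type, so precedence is arithmetic (min) rather than control flow.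
import Mathlib
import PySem

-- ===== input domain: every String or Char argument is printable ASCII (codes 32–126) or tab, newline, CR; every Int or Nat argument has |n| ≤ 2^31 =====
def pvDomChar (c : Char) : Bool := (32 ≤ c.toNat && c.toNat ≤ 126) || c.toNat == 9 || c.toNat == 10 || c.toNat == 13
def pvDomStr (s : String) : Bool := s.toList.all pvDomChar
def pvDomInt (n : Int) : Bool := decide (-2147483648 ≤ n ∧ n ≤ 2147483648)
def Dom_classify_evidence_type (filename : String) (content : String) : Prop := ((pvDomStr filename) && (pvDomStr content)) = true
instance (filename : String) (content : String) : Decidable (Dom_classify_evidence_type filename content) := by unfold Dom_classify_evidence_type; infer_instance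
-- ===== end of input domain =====

-- B replaces A's ordered first-match if-chain by collect-all-matches-then-argmin over keyword priorities (objective: alternative; same cost).

-- ===== PORT A =====
-- literal transliteration of A's if-chain (EvidenceType members are their .value strings)
def classify_evidence_type (filename : String) (content : String) : String :=
  let filename_lower := PySem.Str.lower filename
  let content_lower := PySem.Str.slice (PySem.Str.lower content) none (some 1000)
  if ["policy", "pol-"].any (fun word => PySem.Str.isIn word filename_lower) then "Policy"
  else if ["procedure", "proc-", "sop"].any (fun word => PySem.Str.isIn word filename_lower) then "Procedure"
  else if ["standard", "std-"].any (fun word => PySem.Str.isIn word filename_lower) then "Standard"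
  else if ["diagram", "architecture", "network"].any (fun word => PySem.Str.isIn word filename_lower) then "Diagram"
  else if ["config", "settings"].any (fun word => PySem.Str.isIn word filename_lower) then "Configuration"
  else if [".png", ".jpg", ".jpeg", "screenshot"].any (fun word => PySem.Str.isIn word filename_lower) then "Screenshot"
  else if ["log", "audit"].any (fun word => PySem.Str.isIn word filename_lower) then "Log"
  else if ["report", "assessment"].any (fun word => PySem.Str.isIn word filename_lower) then "Report"
  else if ["training", "awareness"].any (fun word => PySem.Str.isIn word filename_lower) then "Training Record"
  else if ["contract", "agreement", "sla"].any (fun word => PySem.Str.isIn word filename_lower) then "Contract"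
  else if PySem.Str.isIn "policy" content_lower && PySem.Str.isIn "shall" content_lower then "Policy"
  else if PySem.Str.isIn "procedure" content_lower && PySem.Str.isIn "step" content_lower then "Procedure"
  else "Other"

-- ===== PORT B =====
-- Source B's flat keyword → rule-priority table
def pvKwPrio : List (String × Nat) :=
  [ ("policy", 0), ("pol-", 0),
    ("procedure", 1), ("proc-", 1), ("sop", 1),
    ("standard", 2), ("std-", 2),
    ("diagram", 3), ("architecture", 3), ("network", 3),
    ("config", 4), ("settings", 4),
    (".png", 5), (".jpg", 5), (".jpeg", 5), ("screenshot", 5),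
    ("log", 6), ("audit", 6),
    ("report", 7), ("assessment", 7),
    ("training", 8), ("awareness", 8),
    ("contract", 9), ("agreement", 9),
    ("sla", 9) ]

def pvTypes : List String :=
  ["Policy", "Procedure", "Standard", "Diagram", "Configuration",
   "Screenshot", "Log", "Report", "Training Record", "Contract"]

def classify_evidence_type_alt (filename : String) (content : String) : String :=
  let fl := PySem.Str.lower filename
  let cl := PySem.Str.slice (PySem.Str.lower content) none (some 1000)
  -- hits = [prio for kw, prio in _KEYWORD_PRIORITY if kw in fl]
  let hits := (pvKwPrio.filter (fun p => PySem.Str.isIn p.1 fl)).map (fun p => p.2)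
  if hits.isEmpty then
    if PySem.Str.isIn "policy" cl && PySem.Str.isIn "shall" cl then "Policy"
    else if PySem.Str.isIn "procedure" cl && PySem.Str.isIn "step" cl then "Procedure"
    else "Other"
  else
    match PySem.List.min? hits (fun x => x) with
    | some m => (PySem.List.pyGet? pvTypes (Int.ofNat m)).getD "Other"  -- _TYPES[min(hits)]; m < 10 always, the default is unreachable
    | none => "Other"  -- unreachable: hits is nonempty here

-- ===== PRECONDITION & SPEC =====
def Spec_classify_evidence_type (filename : String) (content : String) (out : String) : Prop := out = classify_evidence_type_alt filename content
instance (filename : String) (content : String) (out : String) : Decidable (Spec_classify_evidence_type filename content out) := by unfold Spec_classify_evidence_type; infer_instance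

-- ===== CLAIM =====
def Claim_equal_classify_evidence_type : Prop := ∀ (filename : String) (content : String), Dom_classify_evidence_type filename content → Spec_classify_evidence_type filename content (classify_evidence_type filename content)

-- ===== LEMMAS AND PROOFS =====

def pvHits (fl : String) : List Nat :=
  (pvKwPrio.filter (fun p => PySem.Str.isIn p.1 fl)).map (fun p => p.2)

theorem pvMem_hits (fl : String) {k : String} {i : Nat}
    (hk : (k, i) ∈ pvKwPrio) (hin : PySem.Str.isIn k fl = true) : i ∈ pvHits fl := by
  exact List.mem_map.mpr ⟨(k, i), List.mem_filter.mpr ⟨hk, hin⟩, rfl⟩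

theorem pvHits_lb (fl : String) (i : Nat)
    (hfalse : ∀ k p, (k, p) ∈ pvKwPrio → p < i → PySem.Str.isIn k fl = false) :
    ∀ y ∈ pvHits fl, i ≤ y := by
  intro y hy
  obtain ⟨⟨k, p⟩, hp, rfl⟩ := List.mem_map.mp hy
  obtain ⟨hmem, hin⟩ := List.mem_filter.mp hp
  by_contra h
  have hf := hfalse k p hmem (by omega)
  have hin' : PySem.Str.isIn k fl = true := hin
  rw [hf] at hin'
  cases hin'

theorem pvMin_hits (fl : String) (i : Nat)
    (hmem : i ∈ pvHits fl) (hlb : ∀ y ∈ pvHits fl, i ≤ y) :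
    PySem.List.min? (pvHits fl) (fun x => x) = some i := by
  cases h : PySem.List.min? (pvHits fl) (fun x => x) with
  | none =>
      rw [PySem.List.min?_eq_none_iff] at h
      rw [h] at hmem; cases hmem
  | some m =>
      have hm := PySem.List.min?_mem h
      have hmin : m ≤ i := PySem.List.min?_isMin h i hmem
      have hge : i ≤ m := hlb m hm
      rw [Nat.le_antisymm hmin hge]

-- B's value when priority i is matched and no smaller priority is
theorem pvAlt_eq (filename content : String) (i : Nat)
    (hmem : i ∈ pvHits (PySem.Str.lower filename))
    (hfalse : ∀ k p, (k, p) ∈ pvKwPrio → p < i → PySem.Str.isIn k (PySem.Str.lower filename) = false) :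
    classify_evidence_type_alt filename content
      = (PySem.List.pyGet? pvTypes (Int.ofNat i)).getD "Other" := by
  have hmin := pvMin_hits (PySem.Str.lower filename) i hmem
    (pvHits_lb (PySem.Str.lower filename) i hfalse)
  have hne : (pvHits (PySem.Str.lower filename)).isEmpty = false := by
    cases hh : pvHits (PySem.Str.lower filename) with
    | nil => rw [hh] at hmem; cases hmem
    | cons a t => simp
  unfold pvHits at hne
  unfold pvHits at hmin
  unfold classify_evidence_type_alt
  simp only [hne, Bool.false_eq_true, if_false, hmin]

theorem pvG0 (fl : String) (h0 : PySem.Str.isIn "policy" fl = false) (h1 : PySem.Str.isIn "pol-" fl = false) :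
    ∀ k, (k, 0) ∈ pvKwPrio → PySem.Str.isIn k fl = false := by
  intro k hk
  simp [pvKwPrio] at hk
  rcases hk with rfl | rfl
  · exact h0
  · exact h1
theorem pvG1 (fl : String) (h0 : PySem.Str.isIn "procedure" fl = false) (h1 : PySem.Str.isIn "proc-" fl = false) (h2 : PySem.Str.isIn "sop" fl = false) :
    ∀ k, (k, 1) ∈ pvKwPrio → PySem.Str.isIn k fl = false := by
  intro k hk
  simp [pvKwPrio] at hk
  rcases hk with rfl | rfl | rfl
  · exact h0
  · exact h1
  · exact h2
theorem pvG2 (fl : String) (h0 : PySem.Str.isIn "standard" fl = false) (h1 : PySem.Str.isIn "std-" fl = false) :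
    ∀ k, (k, 2) ∈ pvKwPrio → PySem.Str.isIn k fl = false := by
  intro k hk
  simp [pvKwPrio] at hk
  rcases hk with rfl | rfl
  · exact h0
  · exact h1
theorem pvG3 (fl : String) (h0 : PySem.Str.isIn "diagram" fl = false) (h1 : PySem.Str.isIn "architecture" fl = false) (h2 : PySem.Str.isIn "network" fl = false) :
    ∀ k, (k, 3) ∈ pvKwPrio → PySem.Str.isIn k fl = false := by
  intro k hk
  simp [pvKwPrio] at hk
  rcases hk with rfl | rfl | rfl
  · exact h0
  · exact h1
  · exact h2
theorem pvG4 (fl : String) (h0 : PySem.Str.isIn "config" fl = false) (h1 : PySem.Str.isIn "settings" fl = false) :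
    ∀ k, (k, 4) ∈ pvKwPrio → PySem.Str.isIn k fl = false := by
  intro k hk
  simp [pvKwPrio] at hk
  rcases hk with rfl | rfl
  · exact h0
  · exact h1
theorem pvG5 (fl : String) (h0 : PySem.Str.isIn ".png" fl = false) (h1 : PySem.Str.isIn ".jpg" fl = false) (h2 : PySem.Str.isIn ".jpeg" fl = false) (h3 : PySem.Str.isIn "screenshot" fl = false) :
    ∀ k, (k, 5) ∈ pvKwPrio → PySem.Str.isIn k fl = false := by
  intro k hk
  simp [pvKwPrio] at hk
  rcases hk with rfl | rfl | rfl | rfl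
  · exact h0
  · exact h1
  · exact h2
  · exact h3
theorem pvG6 (fl : String) (h0 : PySem.Str.isIn "log" fl = false) (h1 : PySem.Str.isIn "audit" fl = false) :
    ∀ k, (k, 6) ∈ pvKwPrio → PySem.Str.isIn k fl = false := by
  intro k hk
  simp [pvKwPrio] at hk
  rcases hk with rfl | rfl
  · exact h0
  · exact h1
theorem pvG7 (fl : String) (h0 : PySem.Str.isIn "report" fl = false) (h1 : PySem.Str.isIn "assessment" fl = false) :
    ∀ k, (k, 7) ∈ pvKwPrio → PySem.Str.isIn k fl = false := by
  intro k hk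
  simp [pvKwPrio] at hk
  rcases hk with rfl | rfl
  · exact h0
  · exact h1
theorem pvG8 (fl : String) (h0 : PySem.Str.isIn "training" fl = false) (h1 : PySem.Str.isIn "awareness" fl = false) :
    ∀ k, (k, 8) ∈ pvKwPrio → PySem.Str.isIn k fl = false := by
  intro k hk
  simp [pvKwPrio] at hk
  rcases hk with rfl | rfl
  · exact h0
  · exact h1
theorem pvHits_nil (fl : String) (H : ∀ k p, (k, p) ∈ pvKwPrio → PySem.Str.isIn k fl = false) :
    pvHits fl = [] := by
  unfold pvHits
  have hfil : List.filter (fun p => PySem.Str.isIn p.1 fl) pvKwPrio = [] := by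
    rw [List.filter_eq_nil_iff]
    intro a ha
    simp only [Bool.not_eq_true]
    exact H a.1 a.2 ha
  rw [hfil]
  rfl

theorem classify_evidence_type_spec : Claim_equal_classify_evidence_type := by
  intro filename content _
  show classify_evidence_type filename content = classify_evidence_type_alt filename content
  by_cases h0 : (["policy", "pol-"].any fun word => PySem.Str.isIn word (PySem.Str.lower filename)) = true
  · have hA : classify_evidence_type filename content = "Policy" := by
      simp only [classify_evidence_type, h0, if_true]
    simp only [List.any_cons, List.any_nil, Bool.or_false, Bool.or_eq_true] at h0
    have hmemb : (0:ℕ) ∈ pvHits (PySem.Str.lower filename) := by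
      rcases h0 with h | h
      · exact pvMem_hits _ (by decide) h
      · exact pvMem_hits _ (by decide) h
    have hf : ∀ k p, (k, p) ∈ pvKwPrio → p < 0 → PySem.Str.isIn k (PySem.Str.lower filename) = false := by
      intro k p hk hp
      omega
    rw [hA, pvAlt_eq filename content 0 hmemb hf]
    decide
  · rw [Bool.not_eq_true] at h0
    have g0 := h0
    simp only [List.any_cons, List.any_nil, Bool.or_false, Bool.or_eq_false_iff] at g0
    by_cases h1 : (["procedure", "proc-", "sop"].any fun word => PySem.Str.isIn word (PySem.Str.lower filename)) = true
    · have hA : classify_evidence_type filename content = "Procedure" := by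
        simp only [classify_evidence_type, h0, Bool.false_eq_true, if_false, h1, if_true]
      simp only [List.any_cons, List.any_nil, Bool.or_false, Bool.or_eq_true] at h1
      have hmemb : (1:ℕ) ∈ pvHits (PySem.Str.lower filename) := by
        rcases h1 with h | h | h
        · exact pvMem_hits _ (by decide) h
        · exact pvMem_hits _ (by decide) h
        · exact pvMem_hits _ (by decide) h
      have hf : ∀ k p, (k, p) ∈ pvKwPrio → p < 1 → PySem.Str.isIn k (PySem.Str.lower filename) = false := by
        intro k p hk hp
        interval_cases p
        · exact pvG0 _ g0.1 g0.2 k hk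
      rw [hA, pvAlt_eq filename content 1 hmemb hf]
      decide
    · rw [Bool.not_eq_true] at h1
      have g1 := h1
      simp only [List.any_cons, List.any_nil, Bool.or_false, Bool.or_eq_false_iff] at g1
      by_cases h2 : (["standard", "std-"].any fun word => PySem.Str.isIn word (PySem.Str.lower filename)) = true
      · have hA : classify_evidence_type filename content = "Standard" := by
          simp only [classify_evidence_type, h0, h1, Bool.false_eq_true, if_false, h2, if_true]
        simp only [List.any_cons, List.any_nil, Bool.or_false, Bool.or_eq_true] at h2
        have hmemb : (2:ℕ) ∈ pvHits (PySem.Str.lower filename) := by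
          rcases h2 with h | h
          · exact pvMem_hits _ (by decide) h
          · exact pvMem_hits _ (by decide) h
        have hf : ∀ k p, (k, p) ∈ pvKwPrio → p < 2 → PySem.Str.isIn k (PySem.Str.lower filename) = false := by
          intro k p hk hp
          interval_cases p
          · exact pvG0 _ g0.1 g0.2 k hk
          · exact pvG1 _ g1.1 g1.2.1 g1.2.2 k hk
        rw [hA, pvAlt_eq filename content 2 hmemb hf]
        decide
      · rw [Bool.not_eq_true] at h2
        have g2 := h2
        simp only [List.any_cons, List.any_nil, Bool.or_false, Bool.or_eq_false_iff] at g2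
        by_cases h3 : (["diagram", "architecture", "network"].any fun word => PySem.Str.isIn word (PySem.Str.lower filename)) = true
        · have hA : classify_evidence_type filename content = "Diagram" := by
            simp only [classify_evidence_type, h0, h1, h2, Bool.false_eq_true, if_false, h3, if_true]
          simp only [List.any_cons, List.any_nil, Bool.or_false, Bool.or_eq_true] at h3
          have hmemb : (3:ℕ) ∈ pvHits (PySem.Str.lower filename) := by
            rcases h3 with h | h | h
            · exact pvMem_hits _ (by decide) h
            · exact pvMem_hits _ (by decide) h
            · exact pvMem_hits _ (by decide) h
          have hf : ∀ k p, (k, p) ∈ pvKwPrio → p < 3 → PySem.Str.isIn k (PySem.Str.lower filename) = false := by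
            intro k p hk hp
            interval_cases p
            · exact pvG0 _ g0.1 g0.2 k hk
            · exact pvG1 _ g1.1 g1.2.1 g1.2.2 k hk
            · exact pvG2 _ g2.1 g2.2 k hk
          rw [hA, pvAlt_eq filename content 3 hmemb hf]
          decide
        · rw [Bool.not_eq_true] at h3
          have g3 := h3
          simp only [List.any_cons, List.any_nil, Bool.or_false, Bool.or_eq_false_iff] at g3
          by_cases h4 : (["config", "settings"].any fun word => PySem.Str.isIn word (PySem.Str.lower filename)) = true
          · have hA : classify_evidence_type filename content = "Configuration" := by
              simp only [classify_evidence_type, h0, h1, h2, h3, Bool.false_eq_true, if_false, h4, if_true]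
            simp only [List.any_cons, List.any_nil, Bool.or_false, Bool.or_eq_true] at h4
            have hmemb : (4:ℕ) ∈ pvHits (PySem.Str.lower filename) := by
              rcases h4 with h | h
              · exact pvMem_hits _ (by decide) h
              · exact pvMem_hits _ (by decide) h
            have hf : ∀ k p, (k, p) ∈ pvKwPrio → p < 4 → PySem.Str.isIn k (PySem.Str.lower filename) = false := by
              intro k p hk hp
              interval_cases p
              · exact pvG0 _ g0.1 g0.2 k hk
              · exact pvG1 _ g1.1 g1.2.1 g1.2.2 k hk
              · exact pvG2 _ g2.1 g2.2 k hk
              · exact pvG3 _ g3.1 g3.2.1 g3.2.2 k hk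
            rw [hA, pvAlt_eq filename content 4 hmemb hf]
            decide
          · rw [Bool.not_eq_true] at h4
            have g4 := h4
            simp only [List.any_cons, List.any_nil, Bool.or_false, Bool.or_eq_false_iff] at g4
            by_cases h5 : ([".png", ".jpg", ".jpeg", "screenshot"].any fun word => PySem.Str.isIn word (PySem.Str.lower filename)) = true
            · have hA : classify_evidence_type filename content = "Screenshot" := by
                simp only [classify_evidence_type, h0, h1, h2, h3, h4, Bool.false_eq_true, if_false, h5, if_true]
              simp only [List.any_cons, List.any_nil, Bool.or_false, Bool.or_eq_true] at h5
              have hmemb : (5:ℕ) ∈ pvHits (PySem.Str.lower filename) := by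
                rcases h5 with h | h | h | h
                · exact pvMem_hits _ (by decide) h
                · exact pvMem_hits _ (by decide) h
                · exact pvMem_hits _ (by decide) h
                · exact pvMem_hits _ (by decide) h
              have hf : ∀ k p, (k, p) ∈ pvKwPrio → p < 5 → PySem.Str.isIn k (PySem.Str.lower filename) = false := by
                intro k p hk hp
                interval_cases p
                · exact pvG0 _ g0.1 g0.2 k hk
                · exact pvG1 _ g1.1 g1.2.1 g1.2.2 k hk
                · exact pvG2 _ g2.1 g2.2 k hk
                · exact pvG3 _ g3.1 g3.2.1 g3.2.2 k hk
                · exact pvG4 _ g4.1 g4.2 k hk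
              rw [hA, pvAlt_eq filename content 5 hmemb hf]
              decide
            · rw [Bool.not_eq_true] at h5
              have g5 := h5
              simp only [List.any_cons, List.any_nil, Bool.or_false, Bool.or_eq_false_iff] at g5
              by_cases h6 : (["log", "audit"].any fun word => PySem.Str.isIn word (PySem.Str.lower filename)) = true
              · have hA : classify_evidence_type filename content = "Log" := by
                  simp only [classify_evidence_type, h0, h1, h2, h3, h4, h5, Bool.false_eq_true, if_false, h6, if_true]
                simp only [List.any_cons, List.any_nil, Bool.or_false, Bool.or_eq_true] at h6
                have hmemb : (6:ℕ) ∈ pvHits (PySem.Str.lower filename) := by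
                  rcases h6 with h | h
                  · exact pvMem_hits _ (by decide) h
                  · exact pvMem_hits _ (by decide) h
                have hf : ∀ k p, (k, p) ∈ pvKwPrio → p < 6 → PySem.Str.isIn k (PySem.Str.lower filename) = false := by
                  intro k p hk hp
                  interval_cases p
                  · exact pvG0 _ g0.1 g0.2 k hk
                  · exact pvG1 _ g1.1 g1.2.1 g1.2.2 k hk
                  · exact pvG2 _ g2.1 g2.2 k hk
                  · exact pvG3 _ g3.1 g3.2.1 g3.2.2 k hk
                  · exact pvG4 _ g4.1 g4.2 k hk
                  · exact pvG5 _ g5.1 g5.2.1 g5.2.2.1 g5.2.2.2 k hk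
                rw [hA, pvAlt_eq filename content 6 hmemb hf]
                decide
              · rw [Bool.not_eq_true] at h6
                have g6 := h6
                simp only [List.any_cons, List.any_nil, Bool.or_false, Bool.or_eq_false_iff] at g6
                by_cases h7 : (["report", "assessment"].any fun word => PySem.Str.isIn word (PySem.Str.lower filename)) = true
                · have hA : classify_evidence_type filename content = "Report" := by
                    simp only [classify_evidence_type, h0, h1, h2, h3, h4, h5, h6, Bool.false_eq_true, if_false, h7, if_true]
                  simp only [List.any_cons, List.any_nil, Bool.or_false, Bool.or_eq_true] at h7
                  have hmemb : (7:ℕ) ∈ pvHits (PySem.Str.lower filename) := by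
                    rcases h7 with h | h
                    · exact pvMem_hits _ (by decide) h
                    · exact pvMem_hits _ (by decide) h
                  have hf : ∀ k p, (k, p) ∈ pvKwPrio → p < 7 → PySem.Str.isIn k (PySem.Str.lower filename) = false := by
                    intro k p hk hp
                    interval_cases p
                    · exact pvG0 _ g0.1 g0.2 k hk
                    · exact pvG1 _ g1.1 g1.2.1 g1.2.2 k hk
                    · exact pvG2 _ g2.1 g2.2 k hk
                    · exact pvG3 _ g3.1 g3.2.1 g3.2.2 k hk
                    · exact pvG4 _ g4.1 g4.2 k hk
                    · exact pvG5 _ g5.1 g5.2.1 g5.2.2.1 g5.2.2.2 k hk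
                    · exact pvG6 _ g6.1 g6.2 k hk
                  rw [hA, pvAlt_eq filename content 7 hmemb hf]
                  decide
                · rw [Bool.not_eq_true] at h7
                  have g7 := h7
                  simp only [List.any_cons, List.any_nil, Bool.or_false, Bool.or_eq_false_iff] at g7
                  by_cases h8 : (["training", "awareness"].any fun word => PySem.Str.isIn word (PySem.Str.lower filename)) = true
                  · have hA : classify_evidence_type filename content = "Training Record" := by
                      simp only [classify_evidence_type, h0, h1, h2, h3, h4, h5, h6, h7, Bool.false_eq_true, if_false, h8, if_true]
                    simp only [List.any_cons, List.any_nil, Bool.or_false, Bool.or_eq_true] at h8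
                    have hmemb : (8:ℕ) ∈ pvHits (PySem.Str.lower filename) := by
                      rcases h8 with h | h
                      · exact pvMem_hits _ (by decide) h
                      · exact pvMem_hits _ (by decide) h
                    have hf : ∀ k p, (k, p) ∈ pvKwPrio → p < 8 → PySem.Str.isIn k (PySem.Str.lower filename) = false := by
                      intro k p hk hp
                      interval_cases p
                      · exact pvG0 _ g0.1 g0.2 k hk
                      · exact pvG1 _ g1.1 g1.2.1 g1.2.2 k hk
                      · exact pvG2 _ g2.1 g2.2 k hk
                      · exact pvG3 _ g3.1 g3.2.1 g3.2.2 k hk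
                      · exact pvG4 _ g4.1 g4.2 k hk
                      · exact pvG5 _ g5.1 g5.2.1 g5.2.2.1 g5.2.2.2 k hk
                      · exact pvG6 _ g6.1 g6.2 k hk
                      · exact pvG7 _ g7.1 g7.2 k hk
                    rw [hA, pvAlt_eq filename content 8 hmemb hf]
                    decide
                  · rw [Bool.not_eq_true] at h8
                    have g8 := h8
                    simp only [List.any_cons, List.any_nil, Bool.or_false, Bool.or_eq_false_iff] at g8
                    by_cases h9 : (["contract", "agreement", "sla"].any fun word => PySem.Str.isIn word (PySem.Str.lower filename)) = true
                    · have hA : classify_evidence_type filename content = "Contract" := by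
                        simp only [classify_evidence_type, h0, h1, h2, h3, h4, h5, h6, h7, h8, Bool.false_eq_true, if_false, h9, if_true]
                      simp only [List.any_cons, List.any_nil, Bool.or_false, Bool.or_eq_true] at h9
                      have hmemb : (9:ℕ) ∈ pvHits (PySem.Str.lower filename) := by
                        rcases h9 with h | h | h
                        · exact pvMem_hits _ (by decide) h
                        · exact pvMem_hits _ (by decide) h
                        · exact pvMem_hits _ (by decide) h
                      have hf : ∀ k p, (k, p) ∈ pvKwPrio → p < 9 → PySem.Str.isIn k (PySem.Str.lower filename) = false := by
                        intro k p hk hp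
                        interval_cases p
                        · exact pvG0 _ g0.1 g0.2 k hk
                        · exact pvG1 _ g1.1 g1.2.1 g1.2.2 k hk
                        · exact pvG2 _ g2.1 g2.2 k hk
                        · exact pvG3 _ g3.1 g3.2.1 g3.2.2 k hk
                        · exact pvG4 _ g4.1 g4.2 k hk
                        · exact pvG5 _ g5.1 g5.2.1 g5.2.2.1 g5.2.2.2 k hk
                        · exact pvG6 _ g6.1 g6.2 k hk
                        · exact pvG7 _ g7.1 g7.2 k hk
                        · exact pvG8 _ g8.1 g8.2 k hk
                      rw [hA, pvAlt_eq filename content 9 hmemb hf]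
                      decide
                    · rw [Bool.not_eq_true] at h9
                      have g9 := h9
                      simp only [List.any_cons, List.any_nil, Bool.or_false, Bool.or_eq_false_iff] at g9
                      have hnil : pvHits (PySem.Str.lower filename) = [] := pvHits_nil _ (by
                        intro k p hk
                        simp [pvKwPrio] at hk
                        rcases hk with ⟨rfl, rfl⟩ | ⟨rfl, rfl⟩ | ⟨rfl, rfl⟩ | ⟨rfl, rfl⟩ | ⟨rfl, rfl⟩ | ⟨rfl, rfl⟩ | ⟨rfl, rfl⟩ | ⟨rfl, rfl⟩ | ⟨rfl, rfl⟩ | ⟨rfl, rfl⟩ | ⟨rfl, rfl⟩ | ⟨rfl, rfl⟩ | ⟨rfl, rfl⟩ | ⟨rfl, rfl⟩ | ⟨rfl, rfl⟩ | ⟨rfl, rfl⟩ | ⟨rfl, rfl⟩ | ⟨rfl, rfl⟩ | ⟨rfl, rfl⟩ | ⟨rfl, rfl⟩ | ⟨rfl, rfl⟩ | ⟨rfl, rfl⟩ | ⟨rfl, rfl⟩ | ⟨rfl, rfl⟩ | ⟨rfl, rfl⟩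
                        · exact g0.1
                        · exact g0.2
                        · exact g1.1
                        · exact g1.2.1
                        · exact g1.2.2
                        · exact g2.1
                        · exact g2.2
                        · exact g3.1
                        · exact g3.2.1
                        · exact g3.2.2
                        · exact g4.1
                        · exact g4.2
                        · exact g5.1
                        · exact g5.2.1
                        · exact g5.2.2.1
                        · exact g5.2.2.2
                        · exact g6.1
                        · exact g6.2
                        · exact g7.1
                        · exact g7.2
                        · exact g8.1
                        · exact g8.2
                        · exact g9.1
                        · exact g9.2.1
                        · exact g9.2.2
                        )
                      unfold pvHits at hnil
                      simp only [classify_evidence_type, classify_evidence_type_alt, h0, h1, h2, h3, h4, h5, h6, h7, h8, h9, Bool.false_eq_true, if_false, hnil, List.isEmpty_nil, if_true]
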